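-- pv_equiv track=rewrite | github.com/aelmet/os-netshield | src/opnsense/scripts/netshield/connection_logger.py | match_app
-- ===== SOURCE A (Python) =====
-- def match_app(domain, app_domain_map):
--     """Match a domain against app signatures, trying progressively shorter suffixes."""
--     domain = domain.lower().rstrip('.')
--     # Exact match
--     if domain in app_domain_map:
--         return app_domain_map[domain]
--     # Try removing subdomains progressively
--     parts = domain.split('.')
--     for i in range(1, len(parts) - 1):
--         candidate = '.'.join(parts[i:])
--         if candidate in app_domain_map:
--             return app_domain_map[candidate]
--     return None
-- ===== SOURCE B (Python) =====
-- def match_app(domain, app_domain_map):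
--     """Match a domain against app signatures: walk labels from the end, extending
--     one accumulator suffix; the last stored match (the longest suffix) wins."""
--     domain = domain.lower().rstrip('.')
--     if domain in app_domain_map:
--         return app_domain_map[domain]
--     parts = domain.split('.')
--     result = None
--     acc = parts[len(parts) - 1]
--     for i in range(len(parts) - 2, 0, -1):
--         acc = parts[i] + '.' + acc
--         if acc in app_domain_map:
--             result = app_domain_map[acc]
--     return result
-- ===== Notes on version B (the rewrite author's own statement) =====
-- stated objective: alternative
-- what changed: Instead of scanning start indices ascending and re-joining the tail parts[i:] for each candidate with early return on the first match, B walks labels from the end once, extending a single accumulator suffix per label and overwriting the stored result so the last (= longest) match wins.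
import Mathlib
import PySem

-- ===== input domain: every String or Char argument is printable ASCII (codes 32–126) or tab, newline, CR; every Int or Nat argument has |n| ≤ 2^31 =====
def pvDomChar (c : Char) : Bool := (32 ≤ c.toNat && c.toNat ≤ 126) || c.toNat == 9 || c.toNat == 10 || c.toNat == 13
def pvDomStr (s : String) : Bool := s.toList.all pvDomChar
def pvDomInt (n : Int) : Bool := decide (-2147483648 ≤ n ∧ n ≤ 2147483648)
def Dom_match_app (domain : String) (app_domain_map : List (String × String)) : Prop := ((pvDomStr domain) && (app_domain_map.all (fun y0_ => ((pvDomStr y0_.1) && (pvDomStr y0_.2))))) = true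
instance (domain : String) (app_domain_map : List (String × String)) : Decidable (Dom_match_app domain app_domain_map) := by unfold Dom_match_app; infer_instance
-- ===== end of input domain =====

-- B walks labels from the end, extending one accumulator suffix and overwriting the
-- stored result (last match = longest suffix wins), instead of A's ascending scan that
-- re-joins the tail per start index and returns on the first match.

-- shared helpers of both ports --
-- hand port of s.rstrip('.') (PySem has rstrip only for whitespace): drop trailing '.'
-- characters; exact on every string.
def rstripDots (cs : List Char) : List Char := (cs.reverse.dropWhile (· == '.')).reverse

-- dict membership + lookup on the association list (first match, per the type convention)
def lookupC (m : List (String × String)) (k : List Char) : Option String :=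
  match m with
  | [] => none
  | (a, b) :: t => if a.toList = k then some b else lookupC t k

-- ===== PORT A =====
def match_app (domain : String) (app_domain_map : List (String × String)) : Option String :=
  let d := rstripDots (PySem.Chars.lower domain.toList)
  match lookupC app_domain_map d with
  | some v => some v
  | none =>
    let parts := PySem.Chars.splitOn d ['.']
    (PySem.List.pyRange 1 ((parts.length : Int) - 1) 1).findSome?
      (fun i => lookupC app_domain_map
        (PySem.Chars.join ['.'] (PySem.List.slice parts (some i) none)))

-- ===== PORT B =====
def match_app_alt (domain : String) (app_domain_map : List (String × String)) : Option String :=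
  let d := rstripDots (PySem.Chars.lower domain.toList)
  match lookupC app_domain_map d with
  | some v => some v
  | none =>
    let parts := PySem.Chars.splitOn d ['.']
    -- str.split always returns a non-empty list, so parts[len(parts)-1] never raises; .getD [] is unreachable
    let acc0 := (PySem.List.pyGet? parts ((parts.length : Int) - 1)).getD []
    ((PySem.List.pyRange ((parts.length : Int) - 2) 0 (-1)).foldl
      (fun st i =>
        let acc := (PySem.List.pyGet? parts i).getD [] ++ '.' :: st.2
        match lookupC app_domain_map acc with
        | some v => (some v, acc)
        | none => (st.1, acc))
      ((none : Option String), acc0)).1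

-- ===== PRECONDITION & SPEC =====
def Spec_match_app (domain : String) (app_domain_map : List (String × String)) (out : Option String) : Prop := out = match_app_alt domain app_domain_map
instance (domain : String) (app_domain_map : List (String × String)) (out : Option String) : Decidable (Spec_match_app domain app_domain_map out) := by unfold Spec_match_app; infer_instance

-- ===== CLAIM (what is proved, stated in full; the proofs are below) =====
def Claim_equal_match_app : Prop := ∀ (domain : String) (app_domain_map : List (String × String)), Dom_match_app domain app_domain_map → Spec_match_app domain app_domain_map (match_app domain app_domain_map)

-- ===== LEMMAS AND PROOFS =====

-- the suffix of parts starting at label i, joined with '.'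
def joinFrom (parts : List (List Char)) (i : Nat) : List Char :=
  PySem.Chars.join ['.'] (parts.drop i)

lemma joinFrom_step (parts : List (List Char)) (k : Nat) (h : k + 2 ≤ parts.length) :
    (PySem.List.pyGet? parts (k : Int)).getD [] ++ '.' :: joinFrom parts (k + 1)
      = joinFrom parts k := by
  have hk : k < parts.length := by omega
  have hk1 : k + 1 < parts.length := by omega
  have hget : PySem.List.pyGet? parts (k : Int) = some parts[k] := by
    simp [PySem.List.pyGet?_natCast, List.getElem?_eq_getElem hk]
  have hdropk : parts.drop k = parts[k] :: parts[k + 1] :: parts.drop (k + 2) := by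
    rw [List.drop_eq_getElem_cons hk, List.drop_eq_getElem_cons hk1]
  have hdropk1 : parts.drop (k + 1) = parts[k + 1] :: parts.drop (k + 2) := by
    rw [List.drop_eq_getElem_cons hk1]
  unfold joinFrom
  rw [hget, Option.getD_some, hdropk1, hdropk, PySem.Chars.join_cons_cons]
  simp

lemma fold_eq_findSome (m : List (String × String)) (parts : List (List Char)) :
    ∀ (k : Nat) (r : Option String), k + 2 ≤ parts.length →
    ((PySem.List.pyRange (k : Int) 0 (-1)).foldl
      (fun st i =>
        let acc := (PySem.List.pyGet? parts i).getD [] ++ '.' :: st.2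
        match lookupC m acc with
        | some v => (some v, acc)
        | none => (st.1, acc))
      (r, joinFrom parts (k + 1))).1
    = match (PySem.List.pyRange 1 ((k : Int) + 1) 1).findSome?
        (fun i => lookupC m (PySem.Chars.join ['.'] (PySem.List.slice parts (some i) none))) with
      | some v => some v
      | none => r := by
  intro k
  induction k with
  | zero =>
    intro r _
    rw [PySem.List.pyRange_neg_one_eq_nil (by omega), PySem.List.pyRange_one_eq_nil (by omega)]
    simp
  | succ k ih =>
    intro r h
    simp only [Nat.cast_add, Nat.cast_one]
    have hstep : (PySem.List.pyGet? parts ((k : Int) + 1)).getD [] ++ '.' :: joinFrom parts (k + 1 + 1)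
        = joinFrom parts (k + 1) := by
      have := joinFrom_step parts (k + 1) h
      push_cast at this ⊢
      exact this
    rw [PySem.List.pyRange_neg_one_cons (by positivity), List.foldl_cons]
    have hrange : PySem.List.pyRange 1 ((k : Int) + 1 + 1) 1
        = PySem.List.pyRange 1 ((k : Int) + 1) 1 ++ [(k : Int) + 1] := by
      exact PySem.List.pyRange_one_succ_right (by omega)
    rw [hrange, List.findSome?_append]
    have hslice : PySem.Chars.join ['.'] (PySem.List.slice parts (some ((k : Int) + 1)) none)
        = joinFrom parts (k + 1) := by
      rw [show ((k : Int) + 1) = ((k + 1 : Nat) : Int) by push_cast; ring,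
        PySem.List.slice_from_natCast]
      rfl
    have hsub : ((k : Int) + 1 - 1) = (k : Int) := by ring
    cases hlk : lookupC m (joinFrom parts (k + 1)) with
    | some v =>
      have hstate : (let acc := (PySem.List.pyGet? parts ((k : Int) + 1)).getD [] ++ '.' ::
            ((r : Option String), joinFrom parts (k + 1 + 1)).2
          match lookupC m acc with
          | some v => ((some v : Option String), acc)
          | none => (((r, joinFrom parts (k + 1 + 1)).1 : Option String), acc))
          = ((some v : Option String), joinFrom parts (k + 1)) := by
        simp only [hstep, hlk]
      rw [hstate, hsub, ih (some v) (by omega)]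
      cases hasc : (PySem.List.pyRange 1 ((k : Int) + 1) 1).findSome?
          (fun i => lookupC m (PySem.Chars.join ['.'] (PySem.List.slice parts (some i) none))) with
      | some w => simp
      | none => simp [hslice, hlk]
    | none =>
      have hstate : (let acc := (PySem.List.pyGet? parts ((k : Int) + 1)).getD [] ++ '.' ::
            ((r : Option String), joinFrom parts (k + 1 + 1)).2
          match lookupC m acc with
          | some v => ((some v : Option String), acc)
          | none => (((r, joinFrom parts (k + 1 + 1)).1 : Option String), acc))
          = ((r : Option String), joinFrom parts (k + 1)) := by
        simp only [hstep, hlk]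
      rw [hstate, hsub, ih r (by omega)]
      cases hasc : (PySem.List.pyRange 1 ((k : Int) + 1) 1).findSome?
          (fun i => lookupC m (PySem.Chars.join ['.'] (PySem.List.slice parts (some i) none))) with
      | some w => simp
      | none => simp [hslice, hlk]

-- ===== VERDICT (by name: the statement is the Claim_ definition above) =====
theorem match_app_spec : Claim_equal_match_app := by
  intro domain m _
  unfold Spec_match_app match_app match_app_alt
  cases hlk : lookupC m (rstripDots (PySem.Chars.lower domain.toList)) with
  | some v => simp [hlk]
  | none =>
    simp only [hlk]
    set parts := PySem.Chars.splitOn (rstripDots (PySem.Chars.lower domain.toList)) ['.'] with hparts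
    by_cases hn : 2 ≤ parts.length
    · -- the one-pass fold computes the first ascending match
      have hacc0 : (PySem.List.pyGet? parts ((parts.length : Int) - 1)).getD []
          = joinFrom parts (parts.length - 2 + 1) := by
        have h1 : parts.length - 1 < parts.length := by omega
        have hc : ((parts.length : Int) - 1) = ((parts.length - 1 : Nat) : Int) := by omega
        have hd : parts.drop (parts.length - 1) = [parts[parts.length - 1]] := by
          rw [List.drop_eq_getElem_cons h1, List.drop_eq_nil_of_le (by omega)]
        have he : parts.length - 2 + 1 = parts.length - 1 := by omega
        rw [hc, he]
        simp [PySem.List.pyGet?_natCast, List.getElem?_eq_getElem h1, joinFrom, hd,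
          PySem.Chars.join_singleton]
      have hc2 : ((parts.length : Int) - 2) = ((parts.length - 2 : Nat) : Int) := by omega
      have := fold_eq_findSome m parts (parts.length - 2) none (by omega)
      rw [hc2, hacc0, this]
      have hc3 : (((parts.length - 2 : Nat) : Int) + 1) = (parts.length : Int) - 1 := by omega
      rw [hc3]
      cases hasc : (PySem.List.pyRange 1 ((parts.length : Int) - 1) 1).findSome?
          (fun i => lookupC m (PySem.Chars.join ['.'] (PySem.List.slice parts (some i) none))) with
      | some w => simp
      | none => simp
    · -- no dot or a single label: both loops are empty
      rw [PySem.List.pyRange_one_eq_nil (by omega), PySem.List.pyRange_neg_one_eq_nil (by omega)]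
      simp
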